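-- pv_equiv track=rewrite | github.com/RoseCarson12/Game | Hangman (3).py | replaceWithHyphens
-- ===== SOURCE A (Python) =====
-- def replaceWithHyphens(phrase):
--     newPhrase = ""
--     for n in range(len(phrase)):
--         if (phrase[n] == " "):
--             newPhrase = newPhrase + " "
--         else:
--             newPhrase = newPhrase + "-"
--     return(newPhrase)
-- ===== SOURCE B (Python) =====
-- def replaceWithHyphens(phrase):
--     return " ".join("-" * len(word) for word in phrase.split(" "))
-- ===== Notes on version B (the rewrite author's own statement) =====
-- stated objective: simpler
-- what changed: Replaces the per-character index loop with its space/non-space branch by splitting on the literal space, mapping each segment to a hyphen run of its length, and rejoining the segments with spaces.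
import Mathlib
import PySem

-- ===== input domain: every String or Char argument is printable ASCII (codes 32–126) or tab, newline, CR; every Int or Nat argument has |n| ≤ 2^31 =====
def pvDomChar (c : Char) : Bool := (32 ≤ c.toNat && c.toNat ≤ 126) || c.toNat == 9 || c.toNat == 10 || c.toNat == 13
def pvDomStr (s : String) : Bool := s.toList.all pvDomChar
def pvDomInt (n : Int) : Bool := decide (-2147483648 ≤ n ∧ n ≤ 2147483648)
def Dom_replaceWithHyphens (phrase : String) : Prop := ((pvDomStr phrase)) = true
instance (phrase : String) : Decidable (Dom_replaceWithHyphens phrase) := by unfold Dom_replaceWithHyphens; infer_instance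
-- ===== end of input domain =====

-- B replaces A's per-character index loop by split-on-space / hyphen-runs / rejoin (objective: simpler).

-- ===== PORT A =====
-- index loop: for n in range(len(phrase)): branch on phrase[n] == " ", appending to the accumulator.
-- phrase[n] is always in range here, so PySem.List.pyGetD with any default is exact.
def replaceWithHyphens (phrase : String) : String :=
  String.ofList ((PySem.List.pyRange 0 (PySem.Str.len phrase) 1).foldl
    (fun acc n =>
      if PySem.List.pyGetD phrase.toList n ' ' = ' ' then acc ++ [' '] else acc ++ ['-'])
    [])

-- ===== PORT B =====
-- phrase.split(" ") → List.splitOn ' ' (single-element separator, empty segments kept);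
-- "-" * len(word) → List.replicate; " ".join(…) → List.intercalate [' '].
def replaceWithHyphens_alt (phrase : String) : String :=
  String.ofList (List.intercalate [' ']
    ((phrase.toList.splitOn ' ').map (fun w => List.replicate w.length '-')))

-- ===== PRECONDITION & SPEC =====
def Spec_replaceWithHyphens (phrase : String) (out : String) : Prop := out = replaceWithHyphens_alt phrase
instance (phrase : String) (out : String) : Decidable (Spec_replaceWithHyphens phrase out) := by unfold Spec_replaceWithHyphens; infer_instance

-- ===== CLAIM (what is proved, stated in full; the proofs are below) =====
def Claim_equal_replaceWithHyphens : Prop := ∀ (phrase : String), Dom_replaceWithHyphens phrase → Spec_replaceWithHyphens phrase (replaceWithHyphens phrase)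

-- ===== LEMMAS AND PROOFS =====

-- A's fold, from any accumulator, appends the character-wise image.
theorem pvFoldA (cs : List Char) (acc : List Char) :
    cs.foldl (fun acc c => if c = ' ' then acc ++ [' '] else acc ++ ['-']) acc
      = acc ++ cs.map (fun c => if c = ' ' then ' ' else '-') := by
  induction cs generalizing acc with
  | nil => simp
  | cons c cs ih => by_cases h : c = ' ' <;> simp [h, ih]

-- B's split/replicate/intercalate pipeline equals the character-wise image.
theorem pvIntercalate_cons_cons (s a b : List Char) (t : List (List Char)) :
    List.intercalate s (a :: b :: t) = a ++ s ++ List.intercalate s (b :: t) := by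
  simp [List.intercalate, List.intersperse, List.append_assoc]

theorem pvJoinSplit (cs : List Char) :
    List.intercalate [' '] ((cs.splitOn ' ').map (fun w => List.replicate w.length '-'))
      = cs.map (fun c => if c = ' ' then ' ' else '-') := by
  induction cs with
  | nil => rfl
  | cons c cs ih =>
    obtain ⟨x, l, hx⟩ : ∃ x l, List.splitOn ' ' cs = x :: l := by
      rcases hE : List.splitOn ' ' cs with _ | ⟨x, l⟩
      · exact absurd hE (List.splitOnP_ne_nil _ _)
      · exact ⟨x, l, rfl⟩
    rw [List.splitOn, List.splitOnP_cons]
    rw [show List.splitOnP (fun x => x == ' ') cs = List.splitOn ' ' cs from rfl, hx]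
    rw [hx] at ih
    simp only [List.map_cons] at ih
    by_cases h : c = ' '
    · subst h
      rw [if_pos (by simp)]
      simp only [List.map_cons, pvIntercalate_cons_cons]
      simp [ih]
    · rw [if_neg (by simp [h])]
      simp only [List.modifyHead, List.map_cons, List.length_cons, List.replicate_succ]
      rcases l with _ | ⟨y, l'⟩
      · simp only [List.map_nil] at ih ⊢
        simp only [List.intercalate, List.intersperse, List.flatten_cons, List.flatten_nil, List.append_nil] at ih ⊢
        simp [h, ih]
      · simp only [List.map_cons, pvIntercalate_cons_cons] at ih ⊢
        simp [h, ih]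

-- ===== VERDICT (by name: the statement is the Claim_ definition above) =====
theorem replaceWithHyphens_spec : Claim_equal_replaceWithHyphens := by
  intro phrase _
  unfold Spec_replaceWithHyphens replaceWithHyphens replaceWithHyphens_alt
  simp only [PySem.Str.len_eq]
  rw [PySem.List.foldl_pyRange_zero_pyGetD' phrase.toList ' '
      (fun acc c => if c = ' ' then acc ++ [' '] else acc ++ ['-']) []]
  rw [pvFoldA, pvJoinSplit]
  simp
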